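-- pv_equiv track=rewrite | github.com/site-chenwei/skills-hub | archive/skills/project-onboarding/scripts/project_facts.py | split_toml_array_items
-- ===== SOURCE A (Python) =====
-- def split_toml_array_items(inner: str) -> list[str]:
--     items = []
--     current = []
--     in_string = False
--     quote_char = ""
--     escaped = False
--     for char in inner:
--         if escaped:
--             current.append(char)
--             escaped = False
--             continue
--         if char == "\\" and in_string:
--             current.append(char)
--             escaped = True
--             continue
--         if char in {"'", '"'}:
--             current.append(char)
--             if in_string and char == quote_char:
--                 in_string = False
--                 quote_char = ""
--             elif not in_string:
--                 in_string = True
--                 quote_char = char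
--             continue
--         if char == "," and not in_string:
--             items.append("".join(current).strip())
--             current = []
--             continue
--         current.append(char)
--     if in_string:
--         raise ValueError("数组字符串引号不匹配")
--     tail = "".join(current).strip()
--     if tail:
--         items.append(tail)
--     return items
-- ===== SOURCE B (Python) =====
-- def split_toml_array_items(inner: str) -> list[str]:
--     items = []
--     current = []
--     i = 0
--     n = len(inner)
--     while i < n:
--         ch = inner[i]
--         if ch in ("'", '"'):
--             # consume a whole quoted token in one inner loop
--             current.append(ch)
--             i += 1
--             closed = False
--             while i < n:
--                 c = inner[i]
--                 if c == "\\":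
--                     current.append(c)
--                     i += 1
--                     if i < n:
--                         current.append(inner[i])
--                         i += 1
--                 else:
--                     current.append(c)
--                     i += 1
--                     if c == ch:
--                         closed = True
--                         break
--             if not closed:
--                 raise ValueError("数组字符串引号不匹配")
--         elif ch == ",":
--             items.append("".join(current).strip())
--             current = []
--             i += 1
--         else:
--             current.append(ch)
--             i += 1
--     tail = "".join(current).strip()
--     if tail:
--         items.append(tail)
--     return items
-- ===== Notes on version B (the rewrite author's own statement) =====
-- stated objective: alternative
-- what changed: Replaces A's single per-character state machine with in_string/quote_char/escaped flags by an index-driven outer loop whose nested inner loop consumes each whole quoted token (handling escapes locally), so B keeps no cross-iteration string/escape state.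
import Mathlib
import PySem

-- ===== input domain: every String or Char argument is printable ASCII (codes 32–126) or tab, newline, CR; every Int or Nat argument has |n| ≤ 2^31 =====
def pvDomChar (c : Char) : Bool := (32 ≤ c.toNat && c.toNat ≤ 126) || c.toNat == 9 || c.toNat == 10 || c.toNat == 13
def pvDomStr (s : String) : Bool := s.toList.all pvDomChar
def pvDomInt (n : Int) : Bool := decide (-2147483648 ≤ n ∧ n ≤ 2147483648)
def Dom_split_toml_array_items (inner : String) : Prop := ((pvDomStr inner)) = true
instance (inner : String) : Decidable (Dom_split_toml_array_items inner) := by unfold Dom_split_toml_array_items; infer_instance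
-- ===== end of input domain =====

-- B replaces A's per-character state machine (in_string / quote_char / escaped flags) by an
-- index walk whose inner loop consumes an entire quoted token at once (objective: alternative).
-- Both programs raise ValueError on an unterminated quoted string; Pre_ excludes exactly those inputs.

-- ===== PORT A =====
-- one step of A's for-loop; state: (items, current, in_string, quote_char as Option Char for "", escaped)
def pvAStep (st : List String × List Char × Bool × Option Char × Bool) (c : Char) :
    List String × List Char × Bool × Option Char × Bool :=
  match st with
  | (items, cur, inStr, q, esc) =>
    if esc then (items, cur ++ [c], inStr, q, false)
    else if c = '\\' ∧ inStr then (items, cur ++ [c], inStr, q, true)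
    else if c = '\'' ∨ c = '"' then
      if inStr ∧ some c = q then (items, cur ++ [c], false, none, false)
      else if ¬ inStr then (items, cur ++ [c], true, some c, false)
      else (items, cur ++ [c], inStr, q, false)
    else if c = ',' ∧ ¬ inStr then (items ++ [String.mk (PySem.Chars.strip cur)], [], inStr, q, false)
    else (items, cur ++ [c], inStr, q, false)

def split_toml_array_items (inner : String) : List String :=
  match inner.toList.foldl pvAStep ([], [], false, none, false) with
  | (items, cur, inStr, _, _) =>
    if inStr then items  -- Python raises ValueError here; such inputs are excluded by Pre_
    else
      let tail := PySem.Chars.strip cur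
      if tail ≠ [] then items ++ [String.mk tail] else items

-- ===== PORT B =====
-- B's inner while loop: consume a quoted token up to the closing quote q; none = unterminated (raise)
def pvBInner (q : Char) (cur : List Char) : List Char → Option (List Char × List Char)
  | [] => none
  | c :: rest =>
    if c = '\\' then
      match rest with
      | [] => none
      | d :: rest' => pvBInner q (cur ++ [c, d]) rest'
    else if c = q then some (cur ++ [c], rest)
    else pvBInner q (cur ++ [c]) rest


-- termination measure for pvBOuter (cited by its decreasing_by)
theorem pvBInner_length_le (q : Char) (cur l cur' rest : List Char)
    (h : pvBInner q cur l = some (cur', rest)) : rest.length ≤ l.length := by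
  induction cur, l using pvBInner.induct (q := q) generalizing cur' rest with
  | case1 cur => simp [pvBInner] at h
  | case2 cur => simp [pvBInner] at h
  | case3 cur d rest' ih =>
    simp only [pvBInner, if_pos rfl] at h
    have := ih _ _ h
    simp only [List.length_cons]
    omega
  | case4 cur rest' hq =>
    rw [pvBInner.eq_def] at h
    simp only [hq, if_false, if_pos rfl, Option.some.injEq, Prod.mk.injEq, reduceIte] at h
    obtain ⟨-, rfl⟩ := h
    simp only [List.length_cons]
    omega
  | case5 cur d rest' hb hq ih =>
    rw [pvBInner.eq_def] at h
    simp only [hb, hq, if_false, reduceIte] at h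
    have := ih _ _ h
    simp only [List.length_cons]
    omega

def pvBOuter (items : List String) (cur : List Char) (l : List Char) : List String :=
  match l with
  | [] =>
    let tail := PySem.Chars.strip cur
    if tail ≠ [] then items ++ [String.mk tail] else items
  | c :: rest =>
    if c = '\'' ∨ c = '"' then
      match h : pvBInner c (cur ++ [c]) rest with
      | some (cur', rest') => pvBOuter items cur' rest'
      | none => items
    else if c = ',' then pvBOuter (items ++ [String.mk (PySem.Chars.strip cur)]) [] rest
    else pvBOuter items (cur ++ [c]) rest
termination_by l.length
decreasing_by
  · have := pvBInner_length_le c (cur ++ [c]) rest cur' rest' h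
    simp; omega
  · simp
  · simp


def split_toml_array_items_alt (inner : String) : List String :=
  pvBOuter [] [] inner.toList

-- ===== PRECONDITION & SPEC =====
-- Every quoted string opened in `inner` is terminated: on unterminated input both A and B
-- raise ValueError("数组字符串引号不匹配"), so those inputs carry no return value to compare.
-- quote-scanner state: (currently open quote char, escaped flag)
def pvQuoteStep (st : Option Char × Bool) (c : Char) : Option Char × Bool :=
  match st with
  | (none, _) => if c = '\'' ∨ c = '"' then (some c, false) else (none, false)
  | (some q, true) => (some q, false)
  | (some q, false) =>
    if c = '\\' then (some q, true)
    else if c = q then (none, false)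
    else (some q, false)

def Pre_split_toml_array_items (inner : String) : Prop :=
  (inner.toList.foldl pvQuoteStep (none, false)).1 = none
instance (inner : String) : Decidable (Pre_split_toml_array_items inner) := by
  unfold Pre_split_toml_array_items; infer_instance

def pvWitness_split_toml_array_items : String := "'a,\\b' , \"x'\" , 7"

def Spec_split_toml_array_items (inner : String) (out : List String) : Prop :=
  out = split_toml_array_items_alt inner
instance (inner : String) (out : List String) : Decidable (Spec_split_toml_array_items inner out) := by
  unfold Spec_split_toml_array_items; infer_instance

-- ===== CLAIM (what is proved, stated in full; the proofs are below) =====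
def Claim_equal_split_toml_array_items : Prop :=
  ∀ (inner : String), Dom_split_toml_array_items inner →
    Pre_split_toml_array_items inner →
    Spec_split_toml_array_items inner (split_toml_array_items inner)

-- ===== LEMMAS AND PROOFS =====
def pvAFinish (st : List String × List Char × Bool × Option Char × Bool) : List String :=
  match st with
  | (items, cur, inStr, _, _) =>
    if inStr then items
    else
      let tail := PySem.Chars.strip cur
      if tail ≠ [] then items ++ [String.mk tail] else items

-- step lemmas
theorem pvAStep_esc (items : List String) (cur : List Char) (q : Option Char) (b : Bool) (d : Char) :
    pvAStep (items, cur, b, q, true) d = (items, cur ++ [d], b, q, false) := by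
  simp [pvAStep]

theorem pvAStep_bs (items : List String) (cur : List Char) (q : Option Char) :
    pvAStep (items, cur, true, q, false) '\\' = (items, cur ++ ['\\'], true, q, true) := by
  simp [pvAStep]

theorem pvAStep_close (items : List String) (cur : List Char) (q : Char)
    (hq : q = '\'' ∨ q = '"') :
    pvAStep (items, cur, true, some q, false) q = (items, cur ++ [q], false, none, false) := by
  rcases hq with rfl | rfl <;> simp [pvAStep]

theorem pvAStep_str_other (items : List String) (cur : List Char) (q d : Char)
    (hb : ¬d = '\\') (hne : ¬d = q) :
    pvAStep (items, cur, true, some q, false) d = (items, cur ++ [d], true, some q, false) := by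
  simp [pvAStep, hb, hne]

theorem pvAStep_open (items : List String) (cur : List Char) (c : Char)
    (hc : c = '\'' ∨ c = '"') :
    pvAStep (items, cur, false, none, false) c = (items, cur ++ [c], true, some c, false) := by
  rcases hc with rfl | rfl <;> simp [pvAStep]

theorem pvAStep_comma (items : List String) (cur : List Char) :
    pvAStep (items, cur, false, none, false) ','
      = (items ++ [String.mk (PySem.Chars.strip cur)], [], false, none, false) := by
  simp [pvAStep]

theorem pvAStep_plain (items : List String) (cur : List Char) (c : Char)
    (hc : ¬(c = '\'' ∨ c = '"')) (hcm : ¬c = ',') :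
    pvAStep (items, cur, false, none, false) c = (items, cur ++ [c], false, none, false) := by
  simp [pvAStep, hcm]
  push_neg at hc
  exact hc

-- L1: the A-machine run across a quoted token equals resuming from the closed state
theorem pvA_fold_inner (q : Char) (hq : q = '\'' ∨ q = '"') (cur l cur' rest : List Char)
    (h : pvBInner q cur l = some (cur', rest)) (items : List String) :
    List.foldl pvAStep (items, cur, true, some q, false) l
      = List.foldl pvAStep (items, cur', false, none, false) rest := by
  induction cur, l using pvBInner.induct (q := q) generalizing cur' rest with
  | case1 cur => simp [pvBInner] at h
  | case2 cur => simp [pvBInner] at h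
  | case3 cur d rest' ih =>
    rw [pvBInner.eq_def] at h
    simp only [reduceIte] at h
    rw [List.foldl_cons, pvAStep_bs, List.foldl_cons, pvAStep_esc]
    rw [show (cur ++ ['\\']) ++ [d] = cur ++ ['\\', d] by simp]
    exact ih _ _ h
  | case4 cur rest' hqb =>
    rw [pvBInner.eq_def] at h
    simp only [hqb, if_false, if_pos rfl, Option.some.injEq, Prod.mk.injEq, reduceIte] at h
    obtain ⟨rfl, rfl⟩ := h
    rw [List.foldl_cons, pvAStep_close _ _ _ hq]
  | case5 cur d rest' hb hne ih =>
    rw [pvBInner.eq_def] at h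
    simp only [hb, hne, if_false, reduceIte] at h
    rw [List.foldl_cons, pvAStep_str_other _ _ _ _ hb hne]
    exact ih _ _ h

-- step lemmas for the quote scanner
theorem pvQS_bs (q : Char) : pvQuoteStep (some q, false) '\\' = (some q, true) := by
  simp [pvQuoteStep]

theorem pvQS_esc (q : Char) (d : Char) : pvQuoteStep (some q, true) d = (some q, false) := rfl

theorem pvQS_close (q : Char) (hq : ¬q = '\\') : pvQuoteStep (some q, false) q = (none, false) := by
  simp [pvQuoteStep, hq]

theorem pvQS_str_other (q d : Char) (hb : ¬d = '\\') (hne : ¬d = q) :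
    pvQuoteStep (some q, false) d = (some q, false) := by
  simp [pvQuoteStep, hb, hne]

theorem pvQS_open (c : Char) (b : Bool) (hc : c = '\'' ∨ c = '"') :
    pvQuoteStep (none, b) c = (some c, false) := by
  rcases hc with rfl | rfl <;> simp [pvQuoteStep]

theorem pvQS_plain (c : Char) (b : Bool) (hc : ¬(c = '\'' ∨ c = '"')) :
    pvQuoteStep (none, b) c = (none, false) := by
  simp [pvQuoteStep, hc]

-- L2: inside a quoted string on balanced input, B's inner loop always closes
theorem pvBInner_of_bal (q : Char) (cur l : List Char)
    (h : (List.foldl pvQuoteStep (some q, false) l).1 = none) :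
    ∃ cur' rest, pvBInner q cur l = some (cur', rest) ∧
      (List.foldl pvQuoteStep (none, false) rest).1 = none := by
  induction cur, l using pvBInner.induct (q := q) with
  | case1 cur => simp at h
  | case2 cur => simp [pvQS_bs] at h
  | case3 cur d rest' ih =>
    rw [List.foldl_cons, pvQS_bs, List.foldl_cons, pvQS_esc] at h
    obtain ⟨cur', rest, h1, h2⟩ := ih h
    exact ⟨cur', rest, by rw [pvBInner.eq_def]; simpa using h1, h2⟩
  | case4 cur rest' hqb =>
    rw [List.foldl_cons, pvQS_close q hqb] at h
    exact ⟨cur ++ [q], rest', by rw [pvBInner.eq_def]; simp [hqb], h⟩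
  | case5 cur d rest' hb hne ih =>
    rw [List.foldl_cons, pvQS_str_other q d hb hne] at h
    obtain ⟨cur', rest, h1, h2⟩ := ih h
    exact ⟨cur', rest, by rw [pvBInner.eq_def]; simpa [hb, hne] using h1, h2⟩

-- main invariant: B's outer loop equals running A's machine and finishing
theorem pvMain (items : List String) (cur l : List Char)
    (hbal : (List.foldl pvQuoteStep (none, false) l).1 = none) :
    pvBOuter items cur l = pvAFinish (List.foldl pvAStep (items, cur, false, none, false) l) := by
  induction items, cur, l using pvBOuter.induct with
  | case1 items cur hne =>
    rw [pvBOuter.eq_def]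
    simp only [List.foldl_nil, pvAFinish, hne, reduceIte, if_true]
    simp [hne]
  | case2 items cur hne =>
    rw [pvBOuter.eq_def]
    simp [pvAFinish, hne]
  | case3 items cur d rest' hd cur' rest'' hinner ih =>
    rw [List.foldl_cons, pvQS_open d false hd] at hbal
    rw [pvBOuter.eq_def]
    simp only [hd, reduceIte]
    rw [List.foldl_cons, pvAStep_open _ _ _ hd, pvA_fold_inner d hd _ _ _ _ hinner]
    obtain ⟨c2, r2, h1, h2⟩ := pvBInner_of_bal d (cur ++ [d]) rest' hbal
    rw [hinner] at h1
    simp only [Option.some.injEq, Prod.mk.injEq] at h1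
    obtain ⟨rfl, rfl⟩ := h1
    split
    · rename_i cur2 rest2 heq
      rw [hinner] at heq
      simp only [Option.some.injEq, Prod.mk.injEq] at heq
      obtain ⟨rfl, rfl⟩ := heq
      exact ih h2
    · rename_i heq
      rw [hinner] at heq
      cases heq
  | case4 items cur d rest' hd hinner =>
    rw [List.foldl_cons, pvQS_open d false hd] at hbal
    obtain ⟨c2, r2, h1, -⟩ := pvBInner_of_bal d (cur ++ [d]) rest' hbal
    rw [hinner] at h1
    exact absurd h1 (by simp)
  | case5 items cur rest' hnq ih =>
    rw [List.foldl_cons, pvQS_plain ',' false hnq] at hbal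
    rw [pvBOuter.eq_def]
    simp only [reduceIte]
    rw [List.foldl_cons, pvAStep_comma]
    exact ih hbal
  | case6 items cur d rest' hnq hnc ih =>
    rw [List.foldl_cons, pvQS_plain d false hnq] at hbal
    rw [pvBOuter.eq_def]
    simp only [hnq, hnc, if_false, reduceIte]
    rw [List.foldl_cons, pvAStep_plain _ _ _ hnq hnc]
    exact ih hbal

-- ===== VERDICT (by name: the statement is the Claim_ definition above) =====
theorem split_toml_array_items_spec : Claim_equal_split_toml_array_items := by
  intro inner _ hpre
  unfold Spec_split_toml_array_items
  have h := pvMain [] [] inner.toList hpre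
  unfold split_toml_array_items split_toml_array_items_alt
  rw [h]
  rfl
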